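-- pv_equiv track=rewrite | github.com/myae3080/Algorithm-Study | Baekjoon/python/17829.py | polling
-- ===== SOURCE A (Python) =====
-- def polling(matrix, n):
--     if n == 1:
--         return matrix[0][0]
--     else:
--         half = n // 2
--         new_matrix = [[0] * half for _ in range(half)]
--
--         for i in range(0, n, 2):
--             for j in range(0, n, 2):
--                 new_matrix[i // 2][j // 2] = sorted([matrix[i][j], matrix[i + 1][j], matrix[i][j + 1], matrix[i + 1][j + 1]])[2]
--
--         return polling(new_matrix, half)
-- ===== SOURCE B (Python) =====
-- def polling(matrix, n):
--     while n != 1: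
--         matrix = [
--             [sorted([matrix[i][j], matrix[i + 1][j],
--                      matrix[i][j + 1], matrix[i + 1][j + 1]])[2]
--              for j in range(0, n, 2)]
--             for i in range(0, n, 2)]
--         n //= 2
--     return matrix[0][0]
-- ===== Notes on version B (the rewrite author's own statement) =====
-- stated objective: simpler
-- what changed: Recursion replaced by an iterative while-loop, and the zero-matrix-then-index-assignment construction replaced by a nested comprehension building each half-sized matrix directly.
import Mathlib
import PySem

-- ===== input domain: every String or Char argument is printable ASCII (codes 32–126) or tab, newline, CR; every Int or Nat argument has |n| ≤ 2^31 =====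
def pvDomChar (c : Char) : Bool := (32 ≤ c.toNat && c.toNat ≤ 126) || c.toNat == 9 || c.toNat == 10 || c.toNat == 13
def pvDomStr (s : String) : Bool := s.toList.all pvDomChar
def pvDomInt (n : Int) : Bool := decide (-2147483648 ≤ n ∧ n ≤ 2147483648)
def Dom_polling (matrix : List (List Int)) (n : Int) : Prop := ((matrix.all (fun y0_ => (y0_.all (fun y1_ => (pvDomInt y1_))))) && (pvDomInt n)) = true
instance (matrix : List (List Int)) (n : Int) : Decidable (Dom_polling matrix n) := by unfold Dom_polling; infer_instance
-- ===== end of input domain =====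

-- B replaces A's recursion by an iterative halving loop building each level with a
-- nested comprehension instead of index assignment into a zero matrix; return value only, no speed claim.

-- shared leaf helpers: matrix[i][j] and sorted(four)[2] (identical in both Pythons)
def pvCell (m : List (List Int)) (i j : Int) : Int :=
  PySem.List.pyGetD (PySem.List.pyGetD m i []) j 0

def pvBlock (m : List (List Int)) (i j : Int) : Int :=
  PySem.List.pyGetD
    (PySem.List.sorted [pvCell m i j, pvCell m (i+1) j, pvCell m i (j+1), pvCell m (i+1) (j+1)]
      (fun x => x) false) 2 0

-- ===== PORT A =====
-- fuel bounds the recursion depth only (never reached under Pre_); each call halves n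
def pollingGo : Nat → List (List Int) → Int → Int
  | 0, _, _ => 0
  | fuel+1, matrix, n =>
    if n = 1 then pvCell matrix 0 0
    else
      let half := PySem.Int.floordiv n 2
      let init : List (List Int) :=
        (PySem.List.pyRange 0 half 1).map (fun _ => List.replicate half.toNat 0)
      let newM :=
        (PySem.List.pyRange 0 n 2).foldl (fun m i =>
          (PySem.List.pyRange 0 n 2).foldl (fun m j =>
            PySem.List.pySetD m (PySem.Int.floordiv i 2)
              (PySem.List.pySetD (PySem.List.pyGetD m (PySem.Int.floordiv i 2) [])
                (PySem.Int.floordiv j 2) (pvBlock matrix i j))) m) init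
      pollingGo fuel newM half

def polling (matrix : List (List Int)) (n : Int) : Int := pollingGo (n.toNat + 1) matrix n

-- ===== PORT B =====
-- while n != 1: rebuild matrix as a half-sized comprehension; fuel bounds loop iterations
def pollingAltGo : Nat → List (List Int) → Int → Int
  | 0, matrix, _ => pvCell matrix 0 0
  | fuel+1, matrix, n =>
    if n = 1 then pvCell matrix 0 0
    else
      let newM :=
        (PySem.List.pyRange 0 n 2).map (fun i =>
          (PySem.List.pyRange 0 n 2).map (fun j => pvBlock matrix i j))
      pollingAltGo fuel newM (PySem.Int.floordiv n 2)

def polling_alt (matrix : List (List Int)) (n : Int) : Int := pollingAltGo n.toNat matrix n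

-- ===== PRECONDITION & SPEC =====
-- Pre_ excludes exactly the inputs on which the Python A does not return: n must be a
-- power of two (otherwise A eventually hits an odd level and raises IndexError, or
-- recurses forever for n ≤ 0), and the matrix must carry at least n rows whose first n
-- each carry at least n entries (else IndexError).
def Pre_polling (matrix : List (List Int)) (n : Int) : Prop :=
  (0 < n ∧ n.toNat = 2^(Nat.log2 n.toNat)) ∧ n.toNat ≤ matrix.length ∧
    ∀ row ∈ matrix.take n.toNat, n.toNat ≤ row.length
instance (matrix : List (List Int)) (n : Int) : Decidable (Pre_polling matrix n) := by
  unfold Pre_polling; infer_instance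

def pvWitness_polling : List (List Int) × Int := ([[1, 2], [3, 4]], 2)

def Spec_polling (matrix : List (List Int)) (n : Int) (out : Int) : Prop := out = polling_alt matrix n
instance (matrix : List (List Int)) (n : Int) (out : Int) : Decidable (Spec_polling matrix n out) := by unfold Spec_polling; infer_instance

-- ===== CLAIM (what is proved, stated in full; the proofs are below) =====
def Claim_equal_polling : Prop := ∀ (matrix : List (List Int)) (n : Int), Dom_polling matrix n → Pre_polling matrix n → Spec_polling matrix n (polling matrix n)

-- ===== LEMMAS AND PROOFS =====

-- range(0, 2H, 2) as a mapped Nat range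
lemma pv_range2 (H : Nat) :
    PySem.List.pyRange 0 ((2*H : Nat) : Int) 2 = (List.range H).map (fun k : Nat => (2:Int)*(k:Int)) := by
  rw [PySem.List.pyRange_of_pos 0 ((2*H : Nat) : Int) (by norm_num)]
  have hT : (if (0:Int) < ((2*H : Nat) : Int) then ((((2*H : Nat) : Int) - 0 + 2 - 1) / 2).toNat else 0) = H := by
    rcases Nat.eq_zero_or_pos H with h | h
    · simp [h]
    · have h0 : (0:Int) < ((2*H : Nat) : Int) := by exact_mod_cast Nat.pos_of_ne_zero (by omega)
      rw [if_pos h0]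
      omega
  rw [hT]
  exact List.map_congr_left (fun k _ => by ring)

lemma pv_floordiv2 (p : Nat) : PySem.Int.floordiv ((2:Int)*p) 2 = (p : Int) := by
  rw [show ((2:Int)*p) = ((2*p : Nat) : Int) by push_cast; ring,
      show ((2:Int)) = ((2 : Nat) : Int) by norm_num,
      PySem.Int.floordiv_natCast]
  have : 2*p/2 = p := by omega
  rw [this]

-- setting every index of a prefix of a row
lemma pv_setRow (v : Nat → Int) : ∀ (L : Nat) (r : List Int), L ≤ r.length →
    (List.range L).foldl (fun r q => r.set q (v q)) r = (List.range L).map v ++ r.drop L := by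
  intro L
  induction L with
  | zero => intro r _; simp
  | succ L ih =>
    intro r hr
    have hL : L < r.length := by omega
    have hlen : ((List.range L).map v).length = L := by simp
    rw [List.range_succ, List.foldl_append, ih r (by omega), List.foldl_cons, List.foldl_nil,
        List.set_append_right _ _ (by simp)]
    simp only [hlen, Nat.sub_self]
    rw [List.drop_eq_getElem_cons hL, List.set_cons_zero]
    simp

-- the j-loop over the whole matrix equals one set of the re-built row
lemma pv_innerRow (p : Nat) (v : Nat → Int) : ∀ (l : List Nat) (m : List (List Int)),
    l.foldl (fun m q => m.set p ((m.getD p []).set q (v q))) m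
      = m.set p (l.foldl (fun r q => r.set q (v q)) (m.getD p [])) := by
  intro l
  induction l with
  | nil =>
    intro m
    simp only [List.foldl_nil]
    rcases Nat.lt_or_ge p m.length with h | h
    · rw [List.getD_eq_getElem m [] h, List.set_getElem_self h]
    · rw [List.set_eq_of_length_le h]
  | cons q l ih =>
    intro m
    have hseed : (m.set p ((m.getD p []).set q (v q))).getD p [] = (m.getD p []).set q (v q) := by
      rcases Nat.lt_or_ge p m.length with h | h
      · rw [List.getD_eq_getElem _ _ (by simpa using h), List.getElem_set_self]
      · rw [List.getD_eq_default _ _ (by simpa using h), List.getD_eq_default _ _ h]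
        simp
    rw [List.foldl_cons, ih, List.set_set, List.foldl_cons, hseed]

-- the i-loop fills the rows 0..P-1 of Z one by one
lemma pv_setMat (H : Nat) (g : Nat → Nat → Int) : ∀ (P : Nat) (Z : List (List Int)),
    P ≤ Z.length → (∀ row ∈ Z, row.length = H) →
    (List.range P).foldl
        (fun m p => m.set p ((List.range H).foldl (fun r q => r.set q (g p q)) (m.getD p []))) Z
      = (List.range P).map (fun p => (List.range H).map (g p)) ++ Z.drop P := by
  intro P
  induction P with
  | zero => intro Z _ _; simp
  | succ P ih =>
    intro Z hP hrows
    have hP' : P < Z.length := by omega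
    have hrowlen : Z[P].length = H := hrows _ (List.getElem_mem hP')
    have hlen : ((List.range P).map (fun p => (List.range H).map (g p))).length = P := by simp
    rw [List.range_succ, List.foldl_append, ih Z (by omega) hrows, List.foldl_cons, List.foldl_nil,
        List.drop_eq_getElem_cons hP']
    have hgd : (((List.range P).map (fun p => (List.range H).map (g p))) ++ Z[P] :: Z.drop (P+1)).getD P []
        = Z[P] := by
      rw [List.getD_eq_getElem _ _ (by simp [hlen]; omega), List.getElem_append_right (by simp [hlen])]
      simp [hlen]
    have hdrop : Z[P].drop H = [] := List.drop_eq_nil_iff.mpr (le_of_eq hrowlen)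
    rw [hgd, pv_setRow (g P) H Z[P] (le_of_eq hrowlen.symm), hdrop,
        List.set_append_right _ _ (by simp [hlen])]
    simp only [hlen, Nat.sub_self, List.set_cons_zero, List.append_nil]
    simp

-- A's one halving step produces the canonical half matrix
lemma pv_stepA (matrix : List (List Int)) (H : Nat) :
    (PySem.List.pyRange 0 ((2*H : Nat) : Int) 2).foldl (fun m i =>
      (PySem.List.pyRange 0 ((2*H : Nat) : Int) 2).foldl (fun m j =>
        PySem.List.pySetD m (PySem.Int.floordiv i 2)
          (PySem.List.pySetD (PySem.List.pyGetD m (PySem.Int.floordiv i 2) [])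
            (PySem.Int.floordiv j 2) (pvBlock matrix i j))) m)
      ((PySem.List.pyRange 0 ((H : Nat) : Int) 1).map (fun _ => List.replicate (((H : Nat) : Int)).toNat 0))
    = (List.range H).map (fun p : Nat => (List.range H).map (fun q : Nat => pvBlock matrix ((2:Int)*(p:Int)) ((2:Int)*(q:Int)))) := by
  rw [pv_range2, List.foldl_map]
  have hin : ∀ (m : List (List Int)) (p : Nat),
      ((List.range H).map (fun k : Nat => (2:Int)*(k:Int))).foldl (fun m j =>
        PySem.List.pySetD m (PySem.Int.floordiv ((2:Int)*p) 2)
          (PySem.List.pySetD (PySem.List.pyGetD m (PySem.Int.floordiv ((2:Int)*p) 2) [])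
            (PySem.Int.floordiv j 2) (pvBlock matrix ((2:Int)*p) j))) m
      = m.set p ((List.range H).foldl
          (fun r q => r.set q (pvBlock matrix ((2:Int)*p) ((2:Int)*q))) (m.getD p [])) := by
    intro m p
    rw [List.foldl_map]
    have hfun : (fun (m : List (List Int)) (q : Nat) =>
        PySem.List.pySetD m (PySem.Int.floordiv ((2:Int)*p) 2)
          (PySem.List.pySetD (PySem.List.pyGetD m (PySem.Int.floordiv ((2:Int)*p) 2) [])
            (PySem.Int.floordiv ((2:Int)*q) 2) (pvBlock matrix ((2:Int)*p) ((2:Int)*q))))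
        = (fun (m : List (List Int)) (q : Nat) =>
            m.set p ((m.getD p []).set q (pvBlock matrix ((2:Int)*p) ((2:Int)*q)))) := by
      funext m q
      rw [pv_floordiv2, pv_floordiv2, PySem.List.pyGetD_natCast, PySem.List.pySetD_natCast,
          PySem.List.pySetD_natCast]
    rw [hfun, pv_innerRow p (fun q => pvBlock matrix ((2:Int)*p) ((2:Int)*q)) (List.range H) m]
  simp only [hin]
  have hinit : ((PySem.List.pyRange 0 ((H : Nat) : Int) 1).map
      (fun _ => List.replicate (((H : Nat) : Int)).toNat (0:Int))).length = H := by
    rw [PySem.List.pyRange_one]; simp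
  rw [pv_setMat H (fun p q => pvBlock matrix ((2:Int)*p) ((2:Int)*q)) H _ (le_of_eq hinit.symm)
      (by intro row hrow
          rcases List.mem_map.mp hrow with ⟨_, _, h⟩
          simp [← h]),
      List.drop_eq_nil_iff.mpr (le_of_eq hinit)]
  simp

-- B's one halving step produces the same canonical half matrix
lemma pv_stepB (matrix : List (List Int)) (H : Nat) :
    (PySem.List.pyRange 0 ((2*H : Nat) : Int) 2).map (fun i =>
      (PySem.List.pyRange 0 ((2*H : Nat) : Int) 2).map (fun j => pvBlock matrix i j))
    = (List.range H).map (fun p : Nat => (List.range H).map (fun q : Nat => pvBlock matrix ((2:Int)*(p:Int)) ((2:Int)*(q:Int)))) := by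
  rw [pv_range2]
  simp [List.map_map, Function.comp_def]

lemma pv_main : ∀ (k fuel fuel' : Nat), k < fuel → k ≤ fuel' → ∀ (matrix : List (List Int)),
    pollingGo fuel matrix ((2^k : Nat) : Int) = pollingAltGo fuel' matrix ((2^k : Nat) : Int) := by
  intro k
  induction k with
  | zero =>
    intro fuel fuel' hf _ matrix
    obtain ⟨f, rfl⟩ : ∃ f, fuel = f + 1 := ⟨fuel - 1, by omega⟩
    cases fuel' with
    | zero => simp [pollingGo, pollingAltGo]
    | succ f' => simp [pollingGo, pollingAltGo]
  | succ k ih =>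
    intro fuel fuel' hf hf' matrix
    obtain ⟨f, rfl⟩ : ∃ f, fuel = f + 1 := ⟨fuel - 1, by omega⟩
    obtain ⟨f', rfl⟩ : ∃ g, fuel' = g + 1 := ⟨fuel' - 1, by omega⟩
    have h2 : (1:Nat) < 2^(k+1) := Nat.one_lt_two_pow (by omega)
    have hne : ((2^(k+1) : Nat) : Int) ≠ 1 := by exact_mod_cast Nat.ne_of_gt h2
    have hhalf : PySem.Int.floordiv ((2^(k+1) : Nat) : Int) 2 = ((2^k : Nat) : Int) := by
      rw [show ((2:Int)) = ((2 : Nat) : Int) by norm_num, PySem.Int.floordiv_natCast]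
      have : 2^(k+1)/2 = 2^k := by rw [pow_succ]; omega
      rw [this]
    simp only [pollingGo, pollingAltGo, if_neg hne, hhalf]
    rw [show ((2^(k+1) : Nat) : Int) = ((2 * 2^k : Nat) : Int) by push_cast [pow_succ]; try ring]
    rw [pv_stepA matrix (2^k), pv_stepB matrix (2^k)]
    exact ih f f' (by omega) (by omega) _

-- ===== VERDICT (by name: the statement is the Claim_ definition above) =====
theorem polling_spec : Claim_equal_polling := by
  intro matrix n _ hpre
  obtain ⟨⟨hpos, hpow⟩, _, _⟩ := hpre
  have hn : n = ((2^(Nat.log2 n.toNat) : Nat) : Int) := by omega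
  rw [hn]
  unfold Spec_polling polling polling_alt
  rw [show (((2^(Nat.log2 n.toNat) : Nat) : Int)).toNat = 2^(Nat.log2 n.toNat) from Int.toNat_natCast _]
  exact pv_main _ _ _ (by have := Nat.lt_two_pow_self (n := Nat.log2 n.toNat); omega)
    (le_of_lt Nat.lt_two_pow_self) matrix
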